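-- pv_equiv track=rewrite | github.com/MiMickyyy/Noroantibody | scripts/run_pipeline.py | contiguous_segments
-- ===== SOURCE A (Python) =====
-- from typing import Dict, List, Optional, Sequence, Tuple
--
-- def contiguous_segments(values: List[int]) -> List[List[int]]:
--     if not values:
--         return []
--     vals = sorted(set(int(x) for x in values))
--     out: List[List[int]] = []
--     start = vals[0]
--     prev = vals[0]
--     for v in vals[1:]:
--         if v == prev + 1:
--             prev = v
--             continue
--         out.append([start, prev])
--         start = prev = v
--     out.append([start, prev])
--     return out
-- ===== SOURCE B (Python) =====
-- from typing import List
--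
-- def contiguous_segments(values: List[int]) -> List[List[int]]:
--     # Segment boundaries by set membership: a distinct value v starts a run
--     # iff v-1 is absent from the set and ends a run iff v+1 is absent; the
--     # sorted starts pair up positionally with the sorted ends.
--     s = {int(x) for x in values}
--     starts = sorted(v for v in s if v - 1 not in s)
--     ends = sorted(v for v in s if v + 1 not in s)
--     return [[a, b] for a, b in zip(starts, ends)]
-- ===== Notes on version B (the rewrite author's own statement) =====
-- stated objective: alternative
-- what changed: A sorts the distinct values and detects gaps in one linear scan with (start, prev) accumulator state; B never scans for gaps at all: it classifies each distinct value by set membership (v is a run start iff v-1 is not in the set, a run end iff v+1 is not), sorts the starts and the ends separately, and zips them positionally into segments.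
import Mathlib
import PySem

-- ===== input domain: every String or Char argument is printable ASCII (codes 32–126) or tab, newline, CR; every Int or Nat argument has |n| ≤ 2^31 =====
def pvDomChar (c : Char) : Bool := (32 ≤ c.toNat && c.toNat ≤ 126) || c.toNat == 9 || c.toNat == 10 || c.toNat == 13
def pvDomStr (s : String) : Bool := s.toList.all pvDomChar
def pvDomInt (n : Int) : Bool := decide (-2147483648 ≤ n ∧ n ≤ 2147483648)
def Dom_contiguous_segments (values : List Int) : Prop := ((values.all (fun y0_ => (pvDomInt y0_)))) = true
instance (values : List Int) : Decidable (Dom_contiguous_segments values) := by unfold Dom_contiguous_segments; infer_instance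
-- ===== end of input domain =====

-- B classifies run starts/ends by set membership (v-1 / v+1 absent) and zips the two sorted boundary lists; same result, different algorithm (objective: alternative).

-- ===== PORT A =====
-- for v in vals[1:]: state (out, start, prev); int(x) on an int is the identity
def contiguous_segments (values : List Int) : List (List Int) :=
  if values = [] then []
  else
    let vals := PySem.List.sorted (PySem.Set.ofList values) (fun x => x) false
    match vals with
    | [] => []  -- unreachable: values ≠ [] ⇒ vals ≠ []
    | v0 :: rest =>
      let st := rest.foldl
        (fun (s : List (List Int) × Int × Int) v =>
          if v = s.2.2 + 1 then (s.1, s.2.1, v)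
          else (s.1 ++ [[s.2.1, s.2.2]], v, v)) ([], v0, v0)
      st.1 ++ [[st.2.1, st.2.2]]

-- ===== PORT B =====
-- s = set(int(x) for x in values); starts/ends = sorted filtered by membership; zip comprehension
def contiguous_segments_alt (values : List Int) : List (List Int) :=
  let s := PySem.Set.ofList values
  let starts := PySem.List.sorted (s.filter (fun v => !(s.contains (v - 1)))) (fun x => x) false
  let ends := PySem.List.sorted (s.filter (fun v => !(s.contains (v + 1)))) (fun x => x) false
  (starts.zip ends).map (fun p => [p.1, p.2])

-- ===== PRECONDITION & SPEC =====
def Spec_contiguous_segments (values : List Int) (out : List (List Int)) : Prop := out = contiguous_segments_alt values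
instance (values : List Int) (out : List (List Int)) : Decidable (Spec_contiguous_segments values out) := by unfold Spec_contiguous_segments; infer_instance

-- ===== CLAIM (what is proved, stated in full; the proofs are below) =====
def Claim_equal_contiguous_segments : Prop := ∀ (values : List Int), Dom_contiguous_segments values → Spec_contiguous_segments values (contiguous_segments values)

-- ===== LEMMAS AND PROOFS =====

-- canonical recursive grouping both ports are reduced to
def segsAux (s p : Int) : List Int → List (List Int)
  | [] => [[s, p]]
  | v :: r => if v = p + 1 then segsAux s v r else [s, p] :: segsAux v v r

theorem foldA (r : List Int) : ∀ (out : List (List Int)) (s p : Int),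
    (let st := r.foldl
        (fun (s : List (List Int) × Int × Int) v =>
          if v = s.2.2 + 1 then (s.1, s.2.1, v)
          else (s.1 ++ [[s.2.1, s.2.2]], v, v)) (out, s, p)
     st.1 ++ [[st.2.1, st.2.2]]) = out ++ segsAux s p r := by
  induction r with
  | nil => intro out s p; simp [segsAux]
  | cons v r ih =>
    intro out s p
    simp only [List.foldl_cons, segsAux]
    by_cases h : v = p + 1
    · simp [h, ih]
    · simp [h, ih, List.append_assoc]

theorem segsAux_shape (r : List Int) : ∀ (p : Int), ∃ e rest,
    ∀ s, segsAux s p r = [s, e] :: rest := by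
  induction r with
  | nil => intro p; exact ⟨p, [], fun s => rfl⟩
  | cons w r ih =>
    intro p
    by_cases h : w = p + 1
    · subst h
      obtain ⟨e, rest, hsh⟩ := ih (p + 1)
      exact ⟨e, rest, fun s => by simp [segsAux, hsh]⟩
    · obtain ⟨e, rest, hsh⟩ := ih w
      exact ⟨p, segsAux w w r, fun s => by simp [segsAux, h]⟩

-- zip-and-bracket of the start list and end list
def zipSeg (a b : List Int) : List (List Int) := (a.zip b).map (fun p => [p.1, p.2])

-- membership → Bool contains, both directions
theorem contains_false_of_notMem (l : List Int) (a : Int) (h : a ∉ l) : l.contains a = false := by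
  simp [List.contains_eq_mem, h]

theorem contains_true_of_mem (l : List Int) (a : Int) (h : a ∈ l) : l.contains a = true := by
  simp [List.contains_eq_mem, h]

-- core: on a strictly increasing list, boundary classification + zip = the gap-scan grouping
theorem runs_eq (r : List Int) : ∀ (p : Int), (p :: r).Pairwise (· < ·) →
    zipSeg ((p :: r).filter (fun v => !((p :: r).contains (v - 1))))
           ((p :: r).filter (fun v => !((p :: r).contains (v + 1)))) = segsAux p p r := by
  induction r with
  | nil =>
    intro p _
    have h1 : ([p] : List Int).contains (p - 1) = false :=
      contains_false_of_notMem _ _ (by intro h; rw [List.mem_singleton] at h; omega)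
    have h2 : ([p] : List Int).contains (p + 1) = false :=
      contains_false_of_notMem _ _ (by intro h; rw [List.mem_singleton] at h; omega)
    simp only [List.filter, h1, h2, Bool.not_false]
    simp [zipSeg, segsAux]
  | cons w r ih =>
    intro p hpw
    have hlt : ∀ y ∈ w :: r, p < y := fun y hy => (List.pairwise_cons.mp hpw).1 y hy
    have hwr : (w :: r).Pairwise (· < ·) := (List.pairwise_cons.mp hpw).2
    have hwlt : ∀ y ∈ r, w < y := fun y hy => (List.pairwise_cons.mp hwr).1 y hy
    have hpw' : p < w := hlt w (by simp)
    -- p - 1 is below everything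
    have hpm1 : (p :: w :: r).contains (p - 1) = false := by
      apply contains_false_of_notMem
      intro h
      rcases List.mem_cons.mp h with h | h
      · omega
      · rcases List.mem_cons.mp h with h | h
        · omega
        · have := hwlt _ h; omega
    -- for x > p, membership in the full list is membership in the tail
    have hmem_shift : ∀ x : Int, p < x →
        ((p :: w :: r).contains x) = ((w :: r).contains x) := by
      intro x hx
      simp only [List.contains_eq_mem, decide_eq_decide]
      rw [List.mem_cons]
      constructor
      · rintro (h | h)
        · exact absurd h (by omega)
        · exact h
      · exact Or.inr
    by_cases hw : w = p + 1
    · -- p continues into w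
      subst hw
      have hst : (p :: (p+1) :: r).filter (fun v => !((p :: (p+1) :: r).contains (v - 1)))
          = p :: r.filter (fun v => !(((p+1) :: r).contains (v - 1))) := by
        rw [List.filter_cons_of_pos (by simp only [hpm1, Bool.not_false])]
        congr 1
        rw [List.filter_cons_of_neg (by
          have h1 : (p : Int) + 1 - 1 = p := by ring
          have h2 : (p :: (p+1) :: r).contains p = true :=
            contains_true_of_mem _ _ (by simp)
          rw [h1, h2]; decide)]
        apply List.filter_congr
        intro v hv
        have hvgt := hwlt v hv
        rw [hmem_shift (v - 1) (by omega)]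
      have hen : (p :: (p+1) :: r).filter (fun v => !((p :: (p+1) :: r).contains (v + 1)))
          = ((p+1) :: r).filter (fun v => !(((p+1) :: r).contains (v + 1))) := by
        rw [List.filter_cons_of_neg (by
          have h2 : (p :: (p+1) :: r).contains (p + 1) = true :=
            contains_true_of_mem _ _ (by simp)
          rw [h2]; decide)]
        apply List.filter_congr
        intro v hv
        have hvge : p + 1 ≤ v := by
          rcases List.mem_cons.mp hv with h | h
          · omega
          · have := hwlt v h; omega
        rw [hmem_shift (v + 1) (by omega)]
      have hih := ih (p+1) hwr
      obtain ⟨e, rest, hsh⟩ := segsAux_shape r (p+1)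
      rw [hsh (p+1)] at hih
      have hstw : ((p+1) :: r).filter (fun v => !(((p+1) :: r).contains (v - 1)))
          = (p+1) :: r.filter (fun v => !(((p+1) :: r).contains (v - 1))) := by
        rw [List.filter_cons_of_pos (by
          have h1 : (p : Int) + 1 - 1 = p := by ring
          have h2 : ((p+1) :: r).contains p = false := by
            apply contains_false_of_notMem
            intro h
            rcases List.mem_cons.mp h with h | h
            · omega
            · have := hwlt _ h; omega
          simp only [h1, h2, Bool.not_false])]
      rw [hstw] at hih
      rcases hzt : ((p+1) :: r).filter (fun v => !(((p+1) :: r).contains (v + 1))) with _ | ⟨e', es⟩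
      · rw [hzt] at hih
        simp [zipSeg] at hih
      · rw [hzt] at hih
        simp only [zipSeg, List.zip_cons_cons, List.map_cons, List.cons.injEq] at hih
        obtain ⟨hh, hrest⟩ := hih
        have he2 : e' = e := by simpa using hh.2.1
        show zipSeg _ _ = segsAux p p ((p+1) :: r)
        have hstep : segsAux p p ((p+1) :: r) = segsAux p (p+1) r := by simp [segsAux]
        rw [hstep, hsh p, hst, hen, hzt]
        simp only [zipSeg, List.zip_cons_cons, List.map_cons, List.cons.injEq]
        refine ⟨by simp [he2], hrest⟩
    · -- gap before w: p is both a start and an end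
      have hwgt : p + 1 < w := by omega
      have hst : (p :: w :: r).filter (fun v => !((p :: w :: r).contains (v - 1)))
          = p :: (w :: r).filter (fun v => !((w :: r).contains (v - 1))) := by
        rw [List.filter_cons_of_pos (by simp only [hpm1, Bool.not_false])]
        congr 1
        apply List.filter_congr
        intro v hv
        have hvge : w ≤ v := by
          rcases List.mem_cons.mp hv with h | h
          · omega
          · have := hwlt v h; omega
        rw [hmem_shift (v - 1) (by omega)]
      have hen : (p :: w :: r).filter (fun v => !((p :: w :: r).contains (v + 1)))
          = p :: (w :: r).filter (fun v => !((w :: r).contains (v + 1))) := by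
        rw [List.filter_cons_of_pos (by
          have h2 : (p :: w :: r).contains (p + 1) = false := by
            apply contains_false_of_notMem
            intro h
            rcases List.mem_cons.mp h with h | h
            · omega
            · rcases List.mem_cons.mp h with h | h
              · omega
              · have := hwlt _ h; omega
          simp only [h2, Bool.not_false])]
        congr 1
        apply List.filter_congr
        intro v hv
        have hvge : w ≤ v := by
          rcases List.mem_cons.mp hv with h | h
          · omega
          · have := hwlt v h; omega
        rw [hmem_shift (v + 1) (by omega)]
      rw [hst, hen]
      have hih := ih w hwr
      show zipSeg _ _ = segsAux p p (w :: r)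
      have hstep : segsAux p p (w :: r) = [p, p] :: segsAux w w r := by
        simp [segsAux, hw]
      rw [hstep, ← hih]
      simp [zipSeg]

-- a filtered-then-sorted set equals the filter of the sorted set
theorem sorted_filter (values : List Int) (P : Int → Bool) :
    PySem.List.sorted ((PySem.Set.ofList values).filter P) (fun x => x) false
      = (PySem.List.sorted (PySem.Set.ofList values) (fun x => x) false).filter P := by
  apply PySem.List.sorted_eq_of_perm_of_pairwise_lt
  · exact ((PySem.List.sorted_perm _ _ _).filter P)
  · exact (PySem.List.sorted_ofList_pairwise_lt values).filter _

theorem contains_sorted (values : List Int) (a : Int) :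
    (PySem.Set.ofList values).contains a
      = (PySem.List.sorted (PySem.Set.ofList values) (fun x => x) false).contains a := by
  have h := PySem.List.mem_sorted (PySem.Set.ofList values) (fun x : Int => x) false a
  simp [List.contains_eq_mem, h]

-- ===== VERDICT (by name: the statement is the Claim_ definition above) =====
theorem contiguous_segments_spec : Claim_equal_contiguous_segments := by
  intro values _
  unfold Spec_contiguous_segments contiguous_segments contiguous_segments_alt
  simp only [sorted_filter]
  by_cases hne : values = []
  · subst hne
    simp [PySem.Set.ofList, PySem.List.sorted]
  · rcases hv : PySem.List.sorted (PySem.Set.ofList values) (fun x => x) false with _ | ⟨v0, rest⟩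
    · exfalso
      have hp := PySem.List.sorted_perm (PySem.Set.ofList values) (fun x => x) false
      rw [hv] at hp
      have hnil : PySem.Set.ofList values = [] := hp.symm.eq_nil
      obtain ⟨x, hx⟩ := List.exists_mem_of_ne_nil values hne
      have hm : x ∈ PySem.Set.ofList values := (PySem.Set.mem_ofList values x).mpr hx
      rw [hnil] at hm
      exact (List.not_mem_nil) hm
    · rw [if_neg hne]
      simp only [foldA, List.nil_append]
      have hcc : ∀ a, (PySem.Set.ofList values).contains a = ((v0 :: rest).contains a) := by
        intro a; rw [contains_sorted, hv]
      have h1 : (v0 :: rest).filter (fun v => !((PySem.Set.ofList values).contains (v - 1)))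
          = (v0 :: rest).filter (fun v => !((v0 :: rest).contains (v - 1))) := by
        apply List.filter_congr; intro v _; rw [hcc]
      have h2 : (v0 :: rest).filter (fun v => !((PySem.Set.ofList values).contains (v + 1)))
          = (v0 :: rest).filter (fun v => !((v0 :: rest).contains (v + 1))) := by
        apply List.filter_congr; intro v _; rw [hcc]
      have hpw : (v0 :: rest).Pairwise (· < ·) := by
        rw [← hv]; exact PySem.List.sorted_ofList_pairwise_lt values
      have := runs_eq rest v0 hpw
      rw [h1, h2]
      exact (this.symm.trans rfl)
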